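-- pv_equiv track=rewrite | github.com/skobsvetlana/Skillbox | Module18/09_message/main.py | reversed_word
-- ===== SOURCE A (Python) =====
-- def reversed_word(word):
--     res = []
--     spam = []
--
--     for sym in word:
--         if sym.isalpha():
--             spam.append(sym)
--         else:
--             res.append(''.join(spam[::-1]))
--             res.append(sym)
--             spam = []
--     res.append(''.join(spam[::-1]))
--
--     return ''.join(res)
-- ===== SOURCE B (Python) =====
-- from itertools import groupby
--
-- def reversed_word(word):
--     parts = []
--     for is_alpha, group in groupby(word, key=str.isalpha):
--         chunk = ''.join(group)
--         parts.append(chunk[::-1] if is_alpha else chunk)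
--     return ''.join(parts)
-- ===== Notes on version B (the rewrite author's own statement) =====
-- stated objective: idiomatic
-- what changed: B splits the string into maximal runs of equal alpha-ness with itertools.groupby and reverses only the alphabetic runs, replacing A's per-character loop with a manual pending-run accumulator and flush-on-separator logic.
import Mathlib
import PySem

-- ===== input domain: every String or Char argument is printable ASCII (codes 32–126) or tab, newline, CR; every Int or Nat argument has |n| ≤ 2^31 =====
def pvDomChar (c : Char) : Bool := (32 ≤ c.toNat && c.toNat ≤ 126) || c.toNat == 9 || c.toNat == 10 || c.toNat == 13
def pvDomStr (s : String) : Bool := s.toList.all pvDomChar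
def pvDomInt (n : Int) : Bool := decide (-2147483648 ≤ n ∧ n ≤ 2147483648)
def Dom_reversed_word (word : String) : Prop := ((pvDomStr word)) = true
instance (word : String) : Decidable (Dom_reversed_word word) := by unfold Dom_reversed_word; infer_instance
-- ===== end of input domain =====

-- B is the idiomatic groupby decomposition: split into maximal runs of equal alpha-ness,
-- reverse the alphabetic runs, keep the others; same cost, different structure than A's
-- per-character accumulator loop.

-- ===== PORT A =====
-- state: (res : accumulated pieces, spam : pending alphabetic chars)
def revA_step (st : List (List Char) × List Char) (sym : Char) :
    List (List Char) × List Char :=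
  if PySem.Chars.isalpha sym then (st.1, st.2 ++ [sym])
  else (st.1 ++ [st.2.reverse, [sym]], [])

def reversed_word (word : String) : String :=
  let st := word.toList.foldl revA_step ([], [])
  String.mk (st.1 ++ [st.2.reverse]).flatten

-- ===== PORT B =====
-- altRun p cs = the maximal prefix of cs whose chars have alpha-ness p, and the rest
-- (this is the step itertools.groupby performs for one group)
def altRun (p : Bool) : List Char → List Char × List Char
  | [] => ([], [])
  | c :: cs =>
    if PySem.Chars.isalpha c = p then
      let r := altRun p cs
      (c :: r.1, r.2)
    else ([], c :: cs)

theorem altRun_rest_le (p : Bool) (cs : List Char) : (altRun p cs).2.length ≤ cs.length := by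
  induction cs with
  | nil => simp [altRun]
  | cons c cs ih =>
    simp only [altRun]
    split
    · exact le_trans ih (Nat.le_succ _)
    · simp

-- groupby(word, key=str.isalpha): the list of (key, group) pairs
def altGroups : List Char → List (Bool × List Char)
  | [] => []
  | c :: cs =>
    let p := PySem.Chars.isalpha c
    let r := altRun p cs
    (p, c :: r.1) :: altGroups r.2
termination_by l => l.length
decreasing_by
  simpa using Nat.lt_succ_of_le (altRun_rest_le _ _)

def reversed_word_alt (word : String) : String :=
  String.mk ((altGroups word.toList).map
    (fun g => if g.1 then g.2.reverse else g.2)).flatten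

-- ===== PRECONDITION & SPEC =====
def Spec_reversed_word (word : String) (out : String) : Prop := out = reversed_word_alt word
instance (word : String) (out : String) : Decidable (Spec_reversed_word word out) := by unfold Spec_reversed_word; infer_instance

-- ===== CLAIM (what is proved, stated in full; the proofs are below) =====
def Claim_equal_reversed_word : Prop := ∀ (word : String), Dom_reversed_word word → Spec_reversed_word word (reversed_word word)

-- ===== LEMMAS AND PROOFS =====

def altB (l : List Char) : List Char :=
  ((altGroups l).map (fun g => if g.1 then g.2.reverse else g.2)).flatten

theorem altRun_all (p : Bool) (cs : List Char)
    (h : ∀ c ∈ cs, PySem.Chars.isalpha c = p) : altRun p cs = (cs, []) := by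
  induction cs with
  | nil => simp [altRun]
  | cons c cs ih =>
    have hc := h c (by simp)
    simp only [altRun, hc]
    rw [ih (fun d hd => h d (by simp [hd]))]
    simp

theorem altRun_all_then (as : List Char) (c : Char) (t : List Char)
    (ha : ∀ x ∈ as, PySem.Chars.isalpha x = true)
    (hc : PySem.Chars.isalpha c = false) :
    altRun true (as ++ c :: t) = (as, c :: t) := by
  induction as with
  | nil => simp [altRun, hc]
  | cons a as ih =>
    have haa := ha a (by simp)
    simp only [List.cons_append, altRun, haa]
    rw [ih (fun x hx => ha x (by simp [hx]))]
    simp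

theorem altB_alpha (spam : List Char)
    (h : ∀ c ∈ spam, PySem.Chars.isalpha c = true) : altB spam = spam.reverse := by
  cases spam with
  | nil => simp [altB, altGroups]
  | cons c cs =>
    have hc := h c (by simp)
    rw [altB, altGroups]
    rw [hc, altRun_all true cs (fun d hd => h d (by simp [hd]))]
    simp [altGroups]

theorem altB_cons_nonalpha (c : Char) (cs : List Char)
    (hc : PySem.Chars.isalpha c = false) : altB (c :: cs) = c :: altB cs := by
  cases cs with
  | nil => simp [altB, altGroups, altRun, hc]
  | cons d ds =>
    rw [altB, altGroups, hc]
    by_cases hd : PySem.Chars.isalpha d = false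
    · simp only [altRun, hd]
      rw [altB, altGroups, hd]
      simp
    · have hd' : PySem.Chars.isalpha d = true := by
        cases h : PySem.Chars.isalpha d
        · exact absurd h hd
        · rfl
      simp only [altRun, hd']
      simp [altB]

theorem altB_alpha_prefix (spam : List Char) (c : Char) (t : List Char)
    (h : ∀ x ∈ spam, PySem.Chars.isalpha x = true)
    (hc : PySem.Chars.isalpha c = false) :
    altB (spam ++ c :: t) = spam.reverse ++ altB (c :: t) := by
  cases spam with
  | nil => simp
  | cons a as =>
    have ha := h a (by simp)
    rw [List.cons_append, altB, altGroups, ha,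
      altRun_all_then as c t (fun x hx => h x (by simp [hx])) hc]
    simp [altB]

theorem main_inv (l : List Char) :
    ∀ (res : List (List Char)) (spam : List Char),
    (∀ c ∈ spam, PySem.Chars.isalpha c = true) →
    ((l.foldl revA_step (res, spam)).1 ++ [(l.foldl revA_step (res, spam)).2.reverse]).flatten
      = res.flatten ++ altB (spam ++ l) := by
  induction l with
  | nil =>
    intro res spam hs
    simp [altB_alpha spam hs]
  | cons c cs ih =>
    intro res spam hs
    by_cases hc : PySem.Chars.isalpha c = true
    · have step : revA_step (res, spam) c = (res, spam ++ [c]) := by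
        simp [revA_step, hc]
      have hs' : ∀ d ∈ spam ++ [c], PySem.Chars.isalpha d = true := by
        intro d hd
        rcases List.mem_append.mp hd with h | h
        · exact hs d h
        · simp at h; simpa [h] using hc
      rw [List.foldl_cons, step, ih res (spam ++ [c]) hs']
      simp
    · have hc' : PySem.Chars.isalpha c = false := by
        cases h : PySem.Chars.isalpha c
        · rfl
        · exact absurd h hc
      have step : revA_step (res, spam) c = (res ++ [spam.reverse, [c]], []) := by
        simp [revA_step, hc']
      rw [List.foldl_cons, step, ih (res ++ [spam.reverse, [c]]) [] (by simp),
        altB_alpha_prefix spam c cs hs hc', altB_cons_nonalpha c cs hc']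
      simp

-- ===== VERDICT (by name: the statement is the Claim_ definition above) =====
theorem reversed_word_spec : Claim_equal_reversed_word := by
  intro word _
  unfold Spec_reversed_word reversed_word reversed_word_alt
  have h := main_inv word.toList [] [] (by simp)
  simp only [List.flatten_nil, List.nil_append] at h
  show String.mk _ = _
  rw [h]
  rfl
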